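-- pv_equiv track=rewrite | github.com/oguzhan1998eroglu/a_star | a_star.py | down_is_valid
-- ===== SOURCE A (Python) =====
-- def is_valid(index, row_size, column_size):
--     return (index[0] >= 0 and index[1] >= 0) and (index[0] < row_size and index[1] < column_size)
--
-- def down_is_valid(map, boundary, row_size, column_size):
--     starting_point = boundary[0]
--     finishing_point = boundary[1]
--     down_is_v = True
--     size = abs(starting_point[1] - finishing_point[1]) + 1
--     for i in range(size):
--         if not is_valid([finishing_point[0]+1, finishing_point[1]-i], row_size, column_size):
--             down_is_v = False
--     down_is_zero = True
--     if down_is_v: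
--         for i in range(size):
--             if map[boundary[1][0]+1][boundary[1][1]-i] != 0:
--                 down_is_zero = False
--     return down_is_zero and down_is_v
-- ===== SOURCE B (Python) =====
-- def down_is_valid(map, boundary, row_size, column_size):
--     sp = boundary[0]
--     fp = boundary[1]
--     size = abs(sp[1] - fp[1]) + 1
--     r = fp[0] + 1
--     lo = fp[1] - (size - 1)
--     valid = 0 <= r < row_size and lo >= 0 and fp[1] < column_size
--     if not valid:
--         return False
--     return all(cell == 0 for cell in map[r][lo:fp[1] + 1])
-- ===== Notes on version B (the rewrite author's own statement) =====
-- stated objective: simpler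
-- what changed: Replaced A's O(size) per-cell validity loop by a closed-form boundary check on the run's endpoints, and the second indexed back-to-front scan by a single forward pass (all() over a slice of the row).
import Mathlib
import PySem

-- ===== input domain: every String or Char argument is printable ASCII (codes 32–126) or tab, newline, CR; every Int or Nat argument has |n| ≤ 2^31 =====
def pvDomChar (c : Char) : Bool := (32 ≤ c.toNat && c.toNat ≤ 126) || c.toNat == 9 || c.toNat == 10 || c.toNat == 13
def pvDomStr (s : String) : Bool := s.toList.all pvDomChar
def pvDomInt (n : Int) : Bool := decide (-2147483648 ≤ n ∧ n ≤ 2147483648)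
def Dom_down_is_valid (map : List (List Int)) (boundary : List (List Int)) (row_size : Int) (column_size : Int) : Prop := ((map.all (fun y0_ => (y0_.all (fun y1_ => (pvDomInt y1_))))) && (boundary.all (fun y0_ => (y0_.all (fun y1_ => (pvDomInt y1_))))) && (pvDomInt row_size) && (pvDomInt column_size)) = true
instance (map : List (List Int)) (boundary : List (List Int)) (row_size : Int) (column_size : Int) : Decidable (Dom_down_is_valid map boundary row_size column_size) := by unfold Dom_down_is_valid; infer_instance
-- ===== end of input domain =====

-- B replaces A's per-cell validity loop by a closed-form endpoint check and scans the
-- row once forward over a slice (objective: simpler).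

-- ===== PORT A =====
-- helper is_valid(index, row_size, column_size); index is always a 2-element list
def is_valid (index : List Int) (row_size : Int) (column_size : Int) : Bool :=
  (decide (index.getD 0 0 ≥ 0) && decide (index.getD 1 0 ≥ 0)) &&
  (decide (index.getD 0 0 < row_size) && decide (index.getD 1 0 < column_size))

-- boundary[0]/boundary[1]/…[k] are read with getD; Pre_ guarantees the lists are long
-- enough, exactly where Python would not raise.
def down_is_valid (map : List (List Int)) (boundary : List (List Int)) (row_size : Int) (column_size : Int) : Bool :=
  let starting_point := boundary.getD 0 []
  let finishing_point := boundary.getD 1 []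
  let size := (starting_point.getD 1 0 - finishing_point.getD 1 0).natAbs + 1
  let down_is_v := (List.range size).foldl (fun acc (i : Nat) =>
    if !(is_valid [finishing_point.getD 0 0 + 1, finishing_point.getD 1 0 - (i : Int)] row_size column_size)
    then false else acc) true
  let down_is_zero :=
    if down_is_v then
      (List.range size).foldl (fun acc (i : Nat) =>
        if !((PySem.List.pyGet? ((PySem.List.pyGet? map ((boundary.getD 1 []).getD 0 0 + 1)).getD [])
              ((boundary.getD 1 []).getD 1 0 - (i : Int))).getD 0 == 0)
        then false else acc) true
    else true
  down_is_zero && down_is_v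

-- ===== PORT B =====
def down_is_valid_alt (map : List (List Int)) (boundary : List (List Int)) (row_size : Int) (column_size : Int) : Bool :=
  let sp := boundary.getD 0 []
  let fp := boundary.getD 1 []
  let size : Int := ((sp.getD 1 0 - fp.getD 1 0).natAbs : Int) + 1
  let r := fp.getD 0 0 + 1
  let lo := fp.getD 1 0 - (size - 1)
  let valid := decide (0 ≤ r) && decide (r < row_size) && decide (0 ≤ lo) && decide (fp.getD 1 0 < column_size)
  if !valid then false
  else ((PySem.List.slice ((PySem.List.pyGet? map r).getD []) (some lo) (some (fp.getD 1 0 + 1))).all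
          (fun cell => cell == 0))

-- ===== PRECONDITION & SPEC =====
-- Pre_ excludes exactly the inputs where Python A raises IndexError: boundary (or its
-- first two rows) shorter than 2, or — when the run passes the bounds check — a map
-- too small for the checked row/columns.
def Pre_down_is_valid (map : List (List Int)) (boundary : List (List Int)) (row_size : Int) (column_size : Int) : Prop :=
  2 ≤ boundary.length ∧ 2 ≤ (boundary.getD 0 []).length ∧ 2 ≤ (boundary.getD 1 []).length ∧
  ((0 ≤ (boundary.getD 1 []).getD 0 0 + 1 ∧ (boundary.getD 1 []).getD 0 0 + 1 < row_size ∧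
    0 ≤ (boundary.getD 1 []).getD 1 0 - (((boundary.getD 0 []).getD 1 0 - (boundary.getD 1 []).getD 1 0).natAbs : Int) ∧
    (boundary.getD 1 []).getD 1 0 < column_size) →
   ((boundary.getD 1 []).getD 0 0 + 1 < (map.length : Int) ∧
    (boundary.getD 1 []).getD 1 0 < (((PySem.List.pyGet? map ((boundary.getD 1 []).getD 0 0 + 1)).getD []).length : Int)))
instance (map : List (List Int)) (boundary : List (List Int)) (row_size : Int) (column_size : Int) : Decidable (Pre_down_is_valid map boundary row_size column_size) := by unfold Pre_down_is_valid; infer_instance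

def pvWitness_down_is_valid : List (List Int) × List (List Int) × Int × Int := ([[0], [0]], [[0, 0], [0, 0]], 2, 1)

def Spec_down_is_valid (map : List (List Int)) (boundary : List (List Int)) (row_size : Int) (column_size : Int) (out : Bool) : Prop := out = down_is_valid_alt map boundary row_size column_size
instance (map : List (List Int)) (boundary : List (List Int)) (row_size : Int) (column_size : Int) (out : Bool) : Decidable (Spec_down_is_valid map boundary row_size column_size out) := by unfold Spec_down_is_valid; infer_instance

-- ===== CLAIM (what is proved, stated in full; the proofs are below) =====
def Claim_equal_down_is_valid : Prop := ∀ (map : List (List Int)) (boundary : List (List Int)) (row_size : Int) (column_size : Int), Dom_down_is_valid map boundary row_size column_size → Pre_down_is_valid map boundary row_size column_size → Spec_down_is_valid map boundary row_size column_size (down_is_valid map boundary row_size column_size)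
-- ===== LEMMAS AND PROOFS =====

-- A's flag-carrying loop is an 'all'
theorem foldl_flag (p : Nat → Bool) (l : List Nat) (b : Bool) :
    l.foldl (fun acc i => if !(p i) then false else acc) b = (b && l.all p) := by
  induction l generalizing b with
  | nil => simp
  | cons x xs ih =>
    simp only [List.foldl_cons, List.all_cons, ih]
    cases p x <;> simp

-- the per-cell bounds check over the whole run collapses to its endpoints
theorem all_valid_iff (r c rs cs : Int) (n : Nat) :
    ((List.range (n + 1)).all (fun i =>
      (decide (r ≥ 0) && decide (c - (i : Int) ≥ 0)) && (decide (r < rs) && decide (c - (i : Int) < cs))))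
    = (decide (0 ≤ r) && decide (r < rs) && decide (0 ≤ c - (n : Int)) && decide (c < cs)) := by
  rw [Bool.eq_iff_iff]
  simp only [List.all_eq_true, List.mem_range, Bool.and_eq_true, decide_eq_true_eq]
  constructor
  · intro h
    have h0 := h 0 (by omega)
    have hn := h n (by omega)
    push_cast at h0 hn ⊢
    omega
  · intro h i hi
    have hi' : (i : Int) ≤ (n : Int) := by exact_mod_cast Nat.le_of_lt_succ hi
    omega

-- the zero scan: A's indexed back-to-front range equals B's forward slice
theorem all_zero_eq (row : List Int) (c : Int) (n : Nat)
    (hlo : 0 ≤ c - (n : Int)) (hc : c < (row.length : Int)) :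
    ((List.range (n + 1)).all (fun i => (PySem.List.pyGet? row (c - (i : Int))).getD 0 == 0))
    = ((PySem.List.slice row (some (c - (n : Int))) (some (c + 1))).all (fun cell => cell == 0)) := by
  rw [PySem.List.slice_toNat row (by omega) (by omega), Bool.eq_iff_iff]
  simp only [List.all_eq_true, List.mem_range, beq_iff_eq]
  have hm : ((c - (n : Int)).toNat : Int) = c - (n : Int) := by omega
  have hk : (c + 1).toNat - (c - (n : Int)).toNat = n + 1 := by omega
  rw [hk]
  constructor
  · intro h x hx
    rw [List.mem_iff_getElem] at hx
    obtain ⟨j, hj, hxe⟩ := hx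
    have hj1 : j < n + 1 := by
      have := List.length_take_le (n+1) (row.drop (c - (n : Int)).toNat)
      omega
    have hjlen : (c - (n : Int)).toNat + j < row.length := by
      simp [List.length_take, List.length_drop] at hj
      omega
    have hget : (List.take (n+1) (List.drop (c - (n : Int)).toNat row))[j] = row[(c - (n : Int)).toNat + j]'hjlen := by
      rw [List.getElem_take, List.getElem_drop]
    have h2 := h (n - j) (by omega)
    have hidx : c - ((n - j : Nat) : Int) = (((c - (n : Int)).toNat + j : Nat) : Int) := by
      push_cast
      omega
    rw [hidx, PySem.List.pyGet?_natCast] at h2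
    rw [List.getElem?_eq_getElem hjlen] at h2
    simp only [Option.getD_some] at h2
    rw [← hxe, hget]; exact h2
  · intro h i hi
    have hidx : c - (i : Int) = (((c - (n : Int)).toNat + (n - i) : Nat) : Int) := by
      push_cast
      omega
    have hjlen : (c - (n : Int)).toNat + (n - i) < row.length := by omega
    rw [hidx, PySem.List.pyGet?_natCast, List.getElem?_eq_getElem hjlen]
    simp only [Option.getD_some]
    apply h
    rw [List.mem_iff_getElem]
    refine ⟨n - i, ?_, ?_⟩
    · simp [List.length_take, List.length_drop]
      omega
    · rw [List.getElem_take, List.getElem_drop]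

-- ===== VERDICT (by name: the statement is the Claim_ definition above) =====
theorem down_is_valid_spec : Claim_equal_down_is_valid := by
  intro map boundary rs cs _ hpre
  obtain ⟨hb, hb0, hb1, hmap⟩ := hpre
  unfold Spec_down_is_valid
  simp only [down_is_valid, down_is_valid_alt, is_valid]
  set c := (boundary.getD 1 []).getD 1 0 with hcdef
  set r := (boundary.getD 1 []).getD 0 0 + 1 with hrdef
  set n := ((boundary.getD 0 []).getD 1 0 - c).natAbs with hndef
  set row := (PySem.List.pyGet? map r).getD [] with hrowdef
  simp only [List.getD_cons_zero, List.getD_cons_succ]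
  rw [foldl_flag, foldl_flag, Bool.true_and, Bool.true_and]
  rw [all_valid_iff r c rs cs n]
  have hsz : ((n : Int) + 1 - 1) = (n : Int) := by ring
  by_cases hv : (decide (0 ≤ r) && decide (r < rs) && decide (0 ≤ c - (n : Int)) && decide (c < cs)) = true
  · simp only [hsz] at *
    rw [hv]
    simp only [Bool.and_true, Bool.not_true, Bool.false_eq_true, if_false, if_true]
    have hv' : ((0 ≤ r ∧ r < rs) ∧ (n : Int) ≤ c) ∧ c < cs := by
      simpa using hv
    have hv3 : 0 ≤ c - (n : Int) := by
      have := hv'.1.2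
      omega
    have hm := hmap ⟨hv'.1.1.1, hv'.1.1.2, hv3, hv'.2⟩
    exact all_zero_eq row c n hv3 hm.2
  · simp only [hsz] at *
    rw [Bool.not_eq_true] at hv
    rw [hv]
    simp
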